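-- pv_equiv track=rewrite | github.com/zhouhanxie/DIIR | train_agent.py | truncate_labels
-- ===== SOURCE A (Python) =====
-- def truncate_labels(labels):
--     """
--     Filter rare MI-insonsistent labels from gold
--     to void degradating model behavior.
--     """
--     out = []
--     for l in labels:
--         if l in ('Confront', 'Direct', 'Warn', 'Other'):
--             pass
--         elif 'reflection' in l.lower():
--             out.append('Reflection')
--         elif 'advise' in l.lower():
--             out.append('Advise')
--         elif 'question' in l.lower():
--             out.append('Question')
--         else:
--             out.append(l)
--
--     return out
-- ===== SOURCE B (Python) =====
-- def truncate_labels(labels):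
--     """
--     Filter rare MI-insonsistent labels from gold
--     to void degradating model behavior.
--     """
--     kept = [l for l in labels if l not in ('Confront', 'Direct', 'Warn', 'Other')]
--     # Staged whole-list passes; safe because each canonical name contains no later keyword.
--     p1 = ['Reflection' if 'reflection' in l.lower() else l for l in kept]
--     p2 = ['Advise' if 'advise' in l.lower() else l for l in p1]
--     return ['Question' if 'question' in l.lower() else l for l in p2]
-- ===== Notes on version B (the rewrite author's own statement) =====
-- stated objective: alternative
-- what changed: Replaces A's single accumulator loop with an if-elif cascade by four staged whole-list passes: one filter pass dropping the skip labels, then three independent map passes each replacing one keyword's matches; correct because no canonical name contains a later pass's keyword.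
import Mathlib
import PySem

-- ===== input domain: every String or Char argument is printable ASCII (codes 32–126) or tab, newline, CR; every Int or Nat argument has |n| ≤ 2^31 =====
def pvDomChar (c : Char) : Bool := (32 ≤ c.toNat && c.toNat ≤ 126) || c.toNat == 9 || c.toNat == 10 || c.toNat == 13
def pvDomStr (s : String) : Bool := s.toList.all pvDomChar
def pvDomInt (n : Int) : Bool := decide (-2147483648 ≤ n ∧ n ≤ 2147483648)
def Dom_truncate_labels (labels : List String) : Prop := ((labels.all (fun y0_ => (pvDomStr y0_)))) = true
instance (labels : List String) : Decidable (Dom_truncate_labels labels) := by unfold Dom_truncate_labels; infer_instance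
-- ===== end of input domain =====

-- B replaces A's single accumulator loop with its if-elif cascade by four staged whole-list
-- passes (filter the skip labels, then one replacement pass per keyword); alternative, same cost.

-- ===== PORT A =====
def truncate_labels (labels : List String) : List String :=
  labels.foldl (fun out l =>
    if ["Confront", "Direct", "Warn", "Other"].contains l then out
    else if PySem.Str.isIn "reflection" (PySem.Str.lower l) then out ++ ["Reflection"]
    else if PySem.Str.isIn "advise" (PySem.Str.lower l) then out ++ ["Advise"]
    else if PySem.Str.isIn "question" (PySem.Str.lower l) then out ++ ["Question"]
    else out ++ [l]) []

-- ===== PORT B =====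
def truncate_labels_alt (labels : List String) : List String :=
  let kept := labels.filter (fun l => !(["Confront", "Direct", "Warn", "Other"].contains l))
  let p1 := kept.map (fun l => if PySem.Str.isIn "reflection" (PySem.Str.lower l) then "Reflection" else l)
  let p2 := p1.map (fun l => if PySem.Str.isIn "advise" (PySem.Str.lower l) then "Advise" else l)
  p2.map (fun l => if PySem.Str.isIn "question" (PySem.Str.lower l) then "Question" else l)

-- ===== PRECONDITION & SPEC =====
def Spec_truncate_labels (labels : List String) (out : List String) : Prop := out = truncate_labels_alt labels
instance (labels : List String) (out : List String) : Decidable (Spec_truncate_labels labels out) := by unfold Spec_truncate_labels; infer_instance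

-- ===== CLAIM (what is proved, stated in full; the proofs are below) =====
def Claim_equal_truncate_labels : Prop := ∀ (labels : List String), Dom_truncate_labels labels → Spec_truncate_labels labels (truncate_labels labels)

-- ===== LEMMAS AND PROOFS =====
theorem truncate_labels_foldl (labels : List String) (out : List String) :
    labels.foldl (fun out l =>
      if ["Confront", "Direct", "Warn", "Other"].contains l then out
      else if PySem.Str.isIn "reflection" (PySem.Str.lower l) then out ++ ["Reflection"]
      else if PySem.Str.isIn "advise" (PySem.Str.lower l) then out ++ ["Advise"]
      else if PySem.Str.isIn "question" (PySem.Str.lower l) then out ++ ["Question"]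
      else out ++ [l]) out = out ++ truncate_labels_alt labels := by
  induction labels generalizing out with
  | nil => simp [truncate_labels_alt]
  | cons l rest ih =>
    simp only [List.foldl_cons]
    rw [ih]
    split_ifs with hs h1 h2 h3
    · simp at hs
      rcases hs with h | h | h | h <;> subst h <;> simp [truncate_labels_alt]
    all_goals
      simp at hs
      simp_all [truncate_labels_alt]
    all_goals decide

-- ===== VERDICT (by name: the statement is the Claim_ definition above) =====
theorem truncate_labels_spec : Claim_equal_truncate_labels := by
  intro labels _
  unfold Spec_truncate_labels truncate_labels
  simpa using truncate_labels_foldl labels []
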